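-- pv_equiv track=rewrite | github.com/LorenzHW/Coding-Competitions | code_jam/2019/online/1_forgone_solution.py | forgone_solution
-- ===== SOURCE A (Python) =====
-- def forgone_solution(N):
--     A = [int(c) for c in str(N - 1)]
--     B = [1]
--     while True:
--         res = add(A, B)
--         if not number_has_4(A) and not number_has_4(B):
--             return list_to_int(A), list_to_int(B)
--         A = remove_4(A)
--         B = get_complement(N, A)
--
-- def get_complement(N, number_as_list):
--     i = list_to_int(number_as_list)
--     complement = N - i
--     complement_list = [int(c) for c in str(complement)]
--     return complement_list
--
-- def remove_4(number_as_list, going_down=None):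
--     for i, integer in enumerate(number_as_list):
--         if integer == 4:
--             number_as_list[i] = 3
--     return number_as_list
--
-- def list_to_int(number_as_list):
--     number_as_list = ''.join(map(str, number_as_list))
--     return int(number_as_list)
--
-- def add(A, B):
--     A = list_to_int(A)
--     B = list_to_int(B)
--     return A + B
--
-- def number_has_4(number):
--     for c in str(number):
--         if c == '4':
--             return True
--     return False
-- ===== SOURCE B (Python) =====
-- def forgone_solution(N):
--     digits = [int(c) for c in str(N - 1)]
--     if 4 not in digits:
--         return N - 1, 1
--     a = int(''.join('3' if d == 4 else str(d) for d in digits))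
--     return a, N - a
-- ===== Notes on version B (the rewrite author's own statement) =====
-- stated objective: simpler
-- what changed: A's while-True fixpoint loop with list-mutation helpers (add/remove_4/get_complement/number_has_4 re-parsing str(list) reprs each round) is replaced by a single direct pass over the digits of N-1: if no digit is 4 return (N-1, 1), otherwise map 4->3 to get a and return (a, N-a); no loop, no helpers.
import Mathlib
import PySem

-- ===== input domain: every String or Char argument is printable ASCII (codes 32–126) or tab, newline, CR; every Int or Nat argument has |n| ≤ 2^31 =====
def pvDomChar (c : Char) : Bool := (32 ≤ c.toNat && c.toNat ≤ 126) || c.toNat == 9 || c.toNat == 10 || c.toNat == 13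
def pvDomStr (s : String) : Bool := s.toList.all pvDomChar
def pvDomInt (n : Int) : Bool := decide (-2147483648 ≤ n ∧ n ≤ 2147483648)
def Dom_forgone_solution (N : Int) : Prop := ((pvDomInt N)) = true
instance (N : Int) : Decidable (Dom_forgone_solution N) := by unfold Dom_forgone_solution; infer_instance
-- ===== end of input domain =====

-- B replaces A's while-True fixpoint loop and list-rewriting helpers by one direct pass
-- over the digits of N-1 (objective: simpler).


-- ===== PORT A =====
-- int(s) for a nonempty string of decimal digit characters, hand-ported as a fold over
-- PySem.Int.digitVal?. Exact on such strings, and inside Pre_ every string this file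
-- hands to int() is of that shape (a '-' or other non-digit character reaches int()
-- only for N ≤ 0, where Python's int() raises ValueError and which Pre_ excludes).
def pyIntOfDigitChars (cs : List Char) : Int :=
  cs.foldl (fun a c => a * 10 + (((PySem.Int.digitVal? c).getD 0 : Nat) : Int)) 0

-- [int(c) for c in str(m)]; int(c) on one character ported by PySem.Int.digitVal?
-- (exact for digit characters; '-' raises ValueError = excluded by Pre_)
def pyDigitsOf (m : Int) : List Int :=
  (PySem.Int.toChars m).map (fun c => (((PySem.Int.digitVal? c).getD 0 : Nat) : Int))

-- list_to_int: int(''.join(map(str, l)))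
def pyListToInt (l : List Int) : Int :=
  pyIntOfDigitChars (l.flatMap (fun d => PySem.Int.toChars d))

-- the characters of str(number) where number is a Python list of ints: "[a, b, c]"
def pyStrOfIntList (l : List Int) : List Char :=
  '[' :: (List.intercalate [',', ' '] (l.map PySem.Int.toChars) ++ [']'])

-- number_has_4: for c in str(number): if c == '4': return True / return False
def pyNumberHas4 (l : List Int) : Bool := (pyStrOfIntList l).any (· == '4')

-- remove_4 (mutates entries 4 -> 3 in place and returns the list; ported as a value;
-- the unused default parameter going_down is dropped)
def pyRemove4 (l : List Int) : List Int := l.map (fun d => if d = 4 then 3 else d)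

-- get_complement
def pyGetComplement (N : Int) (l : List Int) : List Int := pyDigitsOf (N - pyListToInt l)

-- add (A never uses its result res)
def pyAdd (A B : List Int) : Int := pyListToInt A + pyListToInt B

-- while True: ported with fuel; fuel 2 suffices on every input admitted by Pre_ (the
-- equivalence proof below shows the loop body runs at most twice there), so the
-- fuel-0 value is never reached inside Pre_.
def pyForgoneLoop : Nat → Int → List Int → List Int → Int × Int
  | 0, _, A, B => (pyListToInt A, pyListToInt B)
  | (f+1), N, A, B =>
    let _res := pyAdd A B
    if ¬ pyNumberHas4 A ∧ ¬ pyNumberHas4 B then (pyListToInt A, pyListToInt B)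
    else
      let A' := pyRemove4 A
      pyForgoneLoop f N A' (pyGetComplement N A')

def forgone_solution (N : Int) : Int × Int :=
  pyForgoneLoop 2 N (pyDigitsOf (N - 1)) [1]

-- ===== PORT B =====
def forgone_solution_alt (N : Int) : Int × Int :=
  let digits := (PySem.Int.toChars (N - 1)).map
    (fun c => (((PySem.Int.digitVal? c).getD 0 : Nat) : Int))
  if (4 : Int) ∉ digits then (N - 1, 1)
  else
    let a := pyIntOfDigitChars
      (digits.flatMap (fun d => if d = 4 then ['3'] else PySem.Int.toChars d))
    (a, N - a)

-- ===== PRECONDITION & SPEC =====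
-- Pre_ excludes exactly N ≤ 0, where A raises ValueError (int('-') while converting the
-- characters of str(N - 1)); B raises the same ValueError there.
def Pre_forgone_solution (N : Int) : Prop := 1 ≤ N
instance (N : Int) : Decidable (Pre_forgone_solution N) := by unfold Pre_forgone_solution; infer_instance
def pvWitness_forgone_solution : Int := (5)

def Spec_forgone_solution (N : Int) (out : Int × Int) : Prop := out = forgone_solution_alt N
instance (N : Int) (out : Int × Int) : Decidable (Spec_forgone_solution N out) := by unfold Spec_forgone_solution; infer_instance

-- ===== CLAIM (what is proved, stated in full; the proofs are below) =====
def Claim_equal_forgone_solution : Prop := ∀ (N : Int), Dom_forgone_solution N → Pre_forgone_solution N → Spec_forgone_solution N (forgone_solution N)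

-- ===== LEMMAS AND PROOFS =====

-- big-endian digit list of a natural number, [0] for 0 (the digit values of str(n))
def bigDigits (n : Nat) : List Nat :=
  if n = 0 then [0] else (Nat.digits 10 n).reverse

-- 4 -> 3 on one decimal digit, and the amount it removes
def f43 (d : Nat) : Nat := if d = 4 then 3 else d
def g43 (d : Nat) : Nat := if d = 4 then 1 else 0

lemma toDigitsCore_acc (b : Nat) : ∀ (f n : Nat) (l : List Char),
    Nat.toDigitsCore b f n l = Nat.toDigitsCore b f n [] ++ l := by
  intro f
  induction f with
  | zero => intro n l; simp [Nat.toDigitsCore]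
  | succ f ih =>
    intro n l
    simp only [Nat.toDigitsCore]
    by_cases h : n / b = 0
    · simp [h]
    · simp only [h]
      rw [ih (n / b) (Nat.digitChar (n % b) :: l), ih (n / b) [Nat.digitChar (n % b)]]
      simp

lemma toDigitsCore_eq_digits (f n : Nat) (hf : n < f) (h : 0 < n) :
    Nat.toDigitsCore 10 f n [] = ((Nat.digits 10 n).map Nat.digitChar).reverse := by
  induction n using Nat.strong_induction_on generalizing f with
  | _ n ih =>
    match f, hf with
    | f + 1, hf =>
      rw [Nat.digits_def' (by norm_num : 1 < 10) h]
      simp only [Nat.toDigitsCore]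
      by_cases hq : n / 10 = 0
      · simp [hq]
      · simp only [hq]
        rw [toDigitsCore_acc]
        rw [ih (n / 10) (Nat.div_lt_self h (by norm_num)) f
          (by omega) (Nat.pos_of_ne_zero hq)]
        simp

lemma toDigits_eq_digits (n : Nat) (h : 0 < n) :
    Nat.toDigits 10 n = ((Nat.digits 10 n).map Nat.digitChar).reverse := by
  unfold Nat.toDigits
  exact toDigitsCore_eq_digits (n + 1) n (by omega) h

lemma toChars_natCast (m : Nat) : PySem.Int.toChars (m : Int) = Nat.toDigits 10 m := by
  simp [PySem.Int.toChars]

lemma toChars_bigDigits (n : Nat) :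
    PySem.Int.toChars (n : Int) = (bigDigits n).map Nat.digitChar := by
  rw [toChars_natCast, bigDigits]
  by_cases h : n = 0
  · subst h; rfl
  · rw [if_neg h, toDigits_eq_digits n (Nat.pos_of_ne_zero h), List.map_reverse]

lemma digitVal_digitChar (d : Nat) (h : d < 10) :
    ((PySem.Int.digitVal? (Nat.digitChar d)).getD 0 : Nat) = d := by
  interval_cases d <;> rfl

lemma digitChar_eq_four_iff (d : Nat) (h : d < 10) : (Nat.digitChar d = '4') ↔ d = 4 := by
  interval_cases d <;> simp <;> decide

lemma toChars_single (d : Nat) (h : d < 10) :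
    PySem.Int.toChars (d : Int) = [Nat.digitChar d] := by
  interval_cases d <;> rfl

lemma bigDigits_lt (n : Nat) : ∀ d ∈ bigDigits n, d < 10 := by
  intro d hd
  rw [bigDigits] at hd
  by_cases h : n = 0
  · simp [h] at hd; omega
  · rw [if_neg h, List.mem_reverse] at hd
    exact Nat.digits_lt_base (by norm_num) hd

lemma mem_bigDigits (n : Nat) : 4 ∈ bigDigits n ↔ 4 ∈ Nat.digits 10 n := by
  rw [bigDigits]
  by_cases h : n = 0
  · simp [h]
  · rw [if_neg h, List.mem_reverse]

lemma pyDigitsOf_natCast (n : Nat) :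
    pyDigitsOf (n : Int) = (bigDigits n).map (fun (d : Nat) => (d : Int)) := by
  rw [pyDigitsOf, toChars_bigDigits, List.map_map]
  apply List.map_congr_left
  intro d hd
  simp [digitVal_digitChar d (bigDigits_lt n d hd)]

lemma pyIntOfDigitChars_map (M : List Nat) (h : ∀ d ∈ M, d < 10) :
    pyIntOfDigitChars (M.map Nat.digitChar) = ((Nat.ofDigits 10 M.reverse : Nat) : Int) := by
  induction M using List.reverseRecOn with
  | nil => rfl
  | append_singleton M d ih =>
    rw [pyIntOfDigitChars] at ih ⊢
    rw [List.map_append, List.foldl_append,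
      ih (fun x hx => h x (List.mem_append_left _ hx)), List.reverse_append]
    simp only [List.map_cons, List.map_nil, List.foldl_cons, List.foldl_nil,
      List.reverse_singleton, List.singleton_append]
    push_cast [Nat.ofDigits_cons]
    rw [digitVal_digitChar d (h d (by simp))]
    ring

lemma flatMap_toChars (M : List Nat) (h : ∀ d ∈ M, d < 10) :
    (M.map (fun (d : Nat) => (d : Int))).flatMap (fun d => PySem.Int.toChars d)
      = M.map Nat.digitChar := by
  induction M with
  | nil => rfl
  | cons d M ih =>
    rw [List.map_cons, List.flatMap_cons, toChars_single d (h d (by simp)),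
      ih (fun x hx => h x (List.mem_cons_of_mem _ hx)), List.map_cons,
      List.singleton_append]

lemma pyListToInt_map (M : List Nat) (h : ∀ d ∈ M, d < 10) :
    pyListToInt (M.map (fun (d : Nat) => (d : Int)))
      = ((Nat.ofDigits 10 M.reverse : Nat) : Int) := by
  rw [pyListToInt, flatMap_toChars M h, pyIntOfDigitChars_map M h]

lemma pyListToInt_bigDigits (n : Nat) :
    pyListToInt ((bigDigits n).map (fun (d : Nat) => (d : Int))) = (n : Int) := by
  rw [pyListToInt_map _ (bigDigits_lt n), bigDigits]
  by_cases h : n = 0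
  · simp [h]
  · rw [if_neg h, List.reverse_reverse, Nat.ofDigits_digits]

lemma any_intercalate (p : Char → Bool) (ls : List (List Char))
    (h : p ',' = false) (h' : p ' ' = false) :
    (List.intercalate [',', ' '] ls).any p = ls.any (fun l => l.any p) := by
  induction ls with
  | nil => rfl
  | cons x ls ih =>
    cases ls with
    | nil => simp [List.intercalate]
    | cons y ls' =>
      simp only [List.intercalate, List.intersperse_cons₂, List.flatten_cons,
        List.any_append, List.any_cons, List.any_nil, h, h'] at ih ⊢
      rw [ih]
      simp

lemma pyNumberHas4_map (M : List Nat) (h : ∀ d ∈ M, d < 10) :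
    pyNumberHas4 (M.map (fun (d : Nat) => (d : Int))) = decide (4 ∈ M) := by
  rw [pyNumberHas4, pyStrOfIntList]
  rw [show ((M.map (fun (d : Nat) => (d : Int))).map PySem.Int.toChars)
        = M.map (fun d => [Nat.digitChar d]) from ?_]
  · rw [List.any_cons, List.any_append,
      any_intercalate _ _ (by decide) (by decide)]
    simp only [List.any_map, Function.comp_def, List.any_cons, List.any_nil, Bool.or_false]
    have key : (M.any fun x => Nat.digitChar x == '4') = decide (4 ∈ M) := by
      by_cases h4 : 4 ∈ M
      · simp only [decide_eq_true h4]
        exact List.any_eq_true.mpr ⟨4, h4, by decide⟩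
      · simp only [decide_eq_false h4]
        refine List.any_eq_false.mpr (fun x hx hb => h4 ?_)
        have hx4 : x = 4 := (digitChar_eq_four_iff x (h x hx)).mp (by simpa using hb)
        exact hx4 ▸ hx
    rw [key]
    simp
  · rw [List.map_map]
    apply List.map_congr_left
    intro d hd
    exact toChars_single d (h d hd)

lemma digits_le_two (E : List Nat) (hE : ∀ e ∈ E, e ≤ 2) :
    ∀ d ∈ Nat.digits 10 (Nat.ofDigits 10 E), d ≤ 2 := by
  induction E with
  | nil => simp
  | cons e E ih =>
    intro d hd
    have he : e ≤ 2 := hE e (by simp)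
    rw [Nat.ofDigits_cons] at hd
    by_cases hz : e + 10 * Nat.ofDigits 10 E = 0
    · rw [hz] at hd; simp at hd
    · rw [Nat.digits_def' (by norm_num : 1 < 10) (Nat.pos_of_ne_zero hz)] at hd
      rcases List.mem_cons.mp hd with h1 | h2
      · have : (e + 10 * Nat.ofDigits 10 E) % 10 = e := by omega
        omega
      · have : (e + 10 * Nat.ofDigits 10 E) / 10 = Nat.ofDigits 10 E := by omega
        rw [this] at h2
        exact ih (fun x hx => hE x (List.mem_cons_of_mem _ hx)) d h2

lemma ofDigits_map_le (L : List Nat) (f : Nat → Nat) (hf : ∀ d, f d ≤ d) :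
    Nat.ofDigits 10 (L.map f) ≤ Nat.ofDigits 10 L := by
  induction L with
  | nil => simp
  | cons d L ih =>
    rw [List.map_cons, Nat.ofDigits_cons, Nat.ofDigits_cons]
    have := hf d
    omega

lemma ofDigits_map_add (L : List Nat) (f g : Nat → Nat) (hfg : ∀ d, f d + g d = d) :
    Nat.ofDigits 10 (L.map f) + Nat.ofDigits 10 (L.map g) = Nat.ofDigits 10 L := by
  induction L with
  | nil => simp
  | cons d L ih =>
    rw [List.map_cons, List.map_cons, Nat.ofDigits_cons, Nat.ofDigits_cons, Nat.ofDigits_cons]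
    have := hfg d
    omega

lemma mem_four_map (M : List Nat) :
    ((4 : Int) ∈ M.map (fun (d : Nat) => (d : Int))) ↔ 4 ∈ M := by
  rw [List.mem_map]
  constructor
  · rintro ⟨d, hd, hc⟩
    have : d = 4 := by exact_mod_cast hc
    exact this ▸ hd
  · intro h
    exact ⟨4, h, by norm_num⟩

lemma pyRemove4_map (M : List Nat) :
    pyRemove4 (M.map (fun (d : Nat) => (d : Int)))
      = (M.map f43).map (fun (d : Nat) => (d : Int)) := by
  rw [pyRemove4, List.map_map, List.map_map]
  apply List.map_congr_left
  intro d _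
  simp only [Function.comp_def, f43]
  by_cases hc : d = 4
  · subst hc; norm_num
  · rw [if_neg hc, if_neg (by exact_mod_cast hc)]

lemma flatMapB (M : List Nat) (h : ∀ d ∈ M, d < 10) :
    (M.map (fun (d : Nat) => (d : Int))).flatMap
        (fun d => if d = 4 then ['3'] else PySem.Int.toChars d)
      = (M.map f43).map Nat.digitChar := by
  induction M with
  | nil => rfl
  | cons d M ih =>
    rw [List.map_cons, List.flatMap_cons,
      ih (fun x hx => h x (List.mem_cons_of_mem _ hx)), List.map_cons, List.map_cons]
    by_cases hc : d = 4
    · subst hc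
      rw [if_pos (by norm_num), f43]
      rfl
    · rw [if_neg (by exact_mod_cast hc), toChars_single d (h d (by simp)),
        List.singleton_append]
      simp [f43, hc]

lemma f43_lt (M : List Nat) (h : ∀ d ∈ M, d < 10) : ∀ d ∈ M.map f43, d < 10 := by
  intro d hd
  rcases List.mem_map.mp hd with ⟨x, hx, hfx⟩
  have := h x hx
  rw [← hfx, f43]
  split <;> omega

lemma four_notMem_f43 (M : List Nat) : 4 ∉ M.map f43 := by
  intro hd
  rcases List.mem_map.mp hd with ⟨x, hx, hfx⟩
  rw [f43] at hfx
  revert hfx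
  split <;> omega

lemma loop_step (f : Nat) (N : Int) (A B : List Int) :
    pyForgoneLoop (f + 1) N A B =
      if ¬ pyNumberHas4 A ∧ ¬ pyNumberHas4 B then (pyListToInt A, pyListToInt B)
      else pyForgoneLoop f N (pyRemove4 A) (pyGetComplement N (pyRemove4 A)) := rfl

-- ===== VERDICT (by name: the statement is the Claim_ definition above) =====
theorem forgone_solution_spec : Claim_equal_forgone_solution := by
  intro N _ hPre
  unfold Pre_forgone_solution at hPre
  unfold Spec_forgone_solution
  obtain ⟨n, hN⟩ : ∃ n : Nat, N - 1 = (n : Int) :=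
    ⟨(N - 1).toNat, (Int.toNat_of_nonneg (by omega)).symm⟩
  have hD : pyDigitsOf (N - 1) = (bigDigits n).map (fun (d : Nat) => (d : Int)) := by
    rw [hN, pyDigitsOf_natCast]
  have hDalt : (PySem.Int.toChars (N - 1)).map
      (fun c => (((PySem.Int.digitVal? c).getD 0 : Nat) : Int))
      = (bigDigits n).map (fun (d : Nat) => (d : Int)) := hD
  by_cases h4 : 4 ∈ bigDigits n
  · -- a digit of N-1 is 4: A corrects once and stops; B takes its else branch
    have hn0 : n ≠ 0 := by
      intro hz
      rw [bigDigits, if_pos hz] at h4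
      simp at h4
    have hM : bigDigits n = (Nat.digits 10 n).reverse := by rw [bigDigits, if_neg hn0]
    set L := Nat.digits 10 n with hL
    set af := Nat.ofDigits 10 (L.map f43) with haf
    have hrev : ((bigDigits n).map f43).reverse = L.map f43 := by
      rw [hM, ← List.map_reverse, List.reverse_reverse]
    have hafle : af ≤ n := by
      have := ofDigits_map_le L f43 (fun d => by rw [f43]; split <;> omega)
      rw [Nat.ofDigits_digits] at this
      exact this
    have hsplit : af + Nat.ofDigits 10 (L.map g43) = n := by
      have := ofDigits_map_add L f43 g43
        (fun d => by rw [f43, g43]; split <;> omega)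
      rw [Nat.ofDigits_digits] at this
      exact this
    have hcomp : N - (af : Int) = ((n + 1 - af : Nat) : Int) := by
      have h1 : N = (n : Int) + 1 := by omega
      rw [h1]
      push_cast [Nat.sub_add_comm hafle]
      omega
    set c := n + 1 - af with hc
    -- every decimal digit of the complement c is ≤ 2, so none is 4
    have hcdig : ∀ d ∈ Nat.digits 10 c, d ≤ 2 := by
      have hLne : L ≠ [] := by
        rw [hL]
        exact Nat.digits_ne_nil_iff_ne_zero.mpr hn0
      cases hLcase : L with
      | nil => exact absurd hLcase hLne
      | cons e t =>
        have hcval : c = Nat.ofDigits 10 ((g43 e + 1) :: t.map g43) := by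
          rw [hc, ← hsplit, hLcase, List.map_cons, Nat.ofDigits_cons, Nat.ofDigits_cons]
          omega
        rw [hcval]
        apply digits_le_two
        intro x hx
        rcases List.mem_cons.mp hx with h1 | h2
        · rw [h1, g43]; split <;> omega
        · rcases List.mem_map.mp h2 with ⟨y, _, hy⟩
          rw [← hy, g43]; split <;> omega
    have hc4 : 4 ∉ bigDigits c := by
      rw [mem_bigDigits]
      intro hx
      have := hcdig 4 hx
      omega
    -- evaluate port A: fuel 2, the first check fails, the second succeeds
    have hlt1 : pyListToInt ((bigDigits n).map f43 |>.map (fun (d : Nat) => (d : Int)))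
        = ((af : Nat) : Int) := by
      rw [pyListToInt_map _ (f43_lt _ (bigDigits_lt n)), hrev]
    have hB1 : pyNumberHas4 (pyDigitsOf (N - 1)) = true := by
      rw [hD, pyNumberHas4_map _ (bigDigits_lt n), decide_eq_true h4]
    have hA : forgone_solution N = (((af : Nat) : Int), ((c : Nat) : Int)) := by
      rw [forgone_solution, loop_step, if_neg (by rw [hB1]; simp),
        hD, pyRemove4_map, pyGetComplement, hlt1, hcomp, pyDigitsOf_natCast,
        loop_step, if_pos, hlt1, pyListToInt_bigDigits]
      constructor
      · rw [pyNumberHas4_map _ (f43_lt _ (bigDigits_lt n)),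
          decide_eq_false (four_notMem_f43 _)]
        simp
      · rw [pyNumberHas4_map _ (bigDigits_lt c), decide_eq_false hc4]
        simp
    have hBside : forgone_solution_alt N = (((af : Nat) : Int), ((c : Nat) : Int)) := by
      rw [forgone_solution_alt]
      simp only [hDalt]
      rw [if_neg (by simp [mem_four_map, h4]),
        flatMapB _ (bigDigits_lt n), pyIntOfDigitChars_map _ (f43_lt _ (bigDigits_lt n)),
        hrev, ← haf, hcomp]
    rw [hA, hBside]
  · -- no digit of N-1 is 4: A returns at once, B takes its first branch
    have hA : forgone_solution N = ((n : Int), 1) := by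
      rw [forgone_solution, loop_step, if_pos, hD, pyListToInt_bigDigits]
      · rfl
      constructor
      · rw [hD, pyNumberHas4_map _ (bigDigits_lt n), decide_eq_false h4]
        simp
      · decide
    have hBside : forgone_solution_alt N = ((n : Int), 1) := by
      rw [forgone_solution_alt]
      simp only [hDalt]
      rw [if_pos (by simp [mem_four_map, h4]), hN]
    rw [hA, hBside]
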